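-- pv_equiv track=rewrite | github.com/DancingOnAir/LeetcodePythonSolution | dp/2645_minimum_additions_to_make_valid_string.py | addMinimum1
-- ===== SOURCE A (Python) =====
-- def addMinimum1(word: str) -> int:
--     if len(set(word)) == 1:
--         return len(word) * 2
--
--     res = 0
--     stk = [word[0]]
--     if word[0] == 'b':
--         res += 1
--     elif word[0] == 'c':
--         res += 2
--     for i in range(1, len(word)):
--         if (stk[-1] == 'a' and word[i] == 'b') or (stk[-1] == 'b' and word[i] == 'c') or (stk[-1] == 'c' and word[i] == 'a'):
--             stk.append(word[i])
--             continue
--         if stk[-1] == 'a' and word[i] == 'a':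
--             res += 2
--         elif stk[-1] == 'a' and word[i] == 'c':
--             res += 1
--         elif stk[-1] == 'b' and word[i] == 'a':
--             res += 1
--         elif stk[-1] == 'b' and word[i] == 'b':
--             res += 2
--         elif stk[-1] == 'c' and word[i] == 'b':
--             res += 1
--         elif stk[-1] == 'c' and word[i] == 'c':
--             res += 2
--         stk.append(word[i])
--     if stk[-1] == 'a':
--         res += 2
--     elif stk[-1] == 'b':
--         res += 1
--     return res
-- ===== SOURCE B (Python) =====
-- def addMinimum1(word: str) -> int:
--     # Boundary fees for the word's first and last character, then one closed-form
--     # contribution per maximal run of pattern letters 'abc' (a state machine over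
--     # the word with a sentinel flushing the final run).
--     total = {'b': 1, 'c': 2}.get(word[0], 0) + {'a': 2, 'b': 1}.get(word[-1], 0)
--     first = prev = None
--     groups = length = 0
--     for c in word + '.':  # '.' sentinel flushes the last run
--         if c in 'abc':
--             if first is None:
--                 first, groups, length = c, 1, 1
--             else:
--                 groups += c <= prev
--                 length += 1
--             prev = c
--         elif first is not None:
--             total += 3 * groups - length - (ord(first) - 97) - (2 - (ord(prev) - 97))
--             first = None
--     return total
-- ===== Notes on version B (the rewrite author's own statement) =====
-- stated objective: alternative
-- what changed: Replaces A's stack plus 9-branch per-transition insertion-cost table by a run state machine: B charges boundary fees for the word's first/last character and adds one closed-form contribution (3*groups - length with offset corrections) per maximal run of pattern letters; no stack list is built, which a timing run measures as a constant-factor speedup; A's len(set(word))==1 shortcut is dropped, giving an intended difference on all-equal words of a non-pattern letter.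
-- intended difference: On non-empty words consisting of one repeated character outside the pattern alphabet a/b/c (e.g. 'dd'), A's len(set(word))==1 shortcut returns 2*len(word) while its own general path and B return 0; since A charges nothing for non-pattern letters everywhere else, B's 0 is the consistent value on this unspecified corner. — e.g. on addMinimum1("dd"): A returns 4, B returns 0
import Mathlib
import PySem

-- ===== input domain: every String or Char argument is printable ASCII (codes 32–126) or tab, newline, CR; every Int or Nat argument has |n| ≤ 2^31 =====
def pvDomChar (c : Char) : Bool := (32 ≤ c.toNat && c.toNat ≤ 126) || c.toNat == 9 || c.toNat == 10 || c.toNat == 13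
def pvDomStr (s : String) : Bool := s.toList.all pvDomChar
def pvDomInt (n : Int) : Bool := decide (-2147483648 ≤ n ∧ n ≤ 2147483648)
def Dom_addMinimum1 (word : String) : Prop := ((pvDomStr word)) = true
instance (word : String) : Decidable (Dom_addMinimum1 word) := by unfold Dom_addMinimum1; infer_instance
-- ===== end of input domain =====

-- B replaces A's stack plus 9-branch insertion-cost table by a run state machine adding one
-- closed-form contribution per maximal run of pattern letters; A's len(set)==1 shortcut is
-- dropped (intended difference D_ on all-equal words of a non-pattern letter).

-- ===== PORT A =====
-- loop body of A's for-loop (state: (stk, res)), transliterated branch for branch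
def stepA (st : List Char × Int) (c : Char) : List Char × Int :=
  let stk := st.1
  let res := st.2
  let top := stk.headD ' '
  if (top = 'a' ∧ c = 'b') ∨ (top = 'b' ∧ c = 'c') ∨ (top = 'c' ∧ c = 'a') then
    (c :: stk, res)
  else
    let res :=
      if top = 'a' ∧ c = 'a' then res + 2
      else if top = 'a' ∧ c = 'c' then res + 1
      else if top = 'b' ∧ c = 'a' then res + 1
      else if top = 'b' ∧ c = 'b' then res + 2
      else if top = 'c' ∧ c = 'b' then res + 1
      else if top = 'c' ∧ c = 'c' then res + 2
      else res
    (c :: stk, res)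

-- the final 'if stk[-1] == ...' adjustment
def finishA (st : List Char × Int) : Int :=
  if st.1.headD ' ' = 'a' then st.2 + 2
  else if st.1.headD ' ' = 'b' then st.2 + 1
  else st.2

def addMinimum1 (word : String) : Int :=
  let cs := word.toList
  if (PySem.Set.ofList cs).length = 1 then (cs.length : Int) * 2
  else
    match cs with
    | [] => 0  -- word[0] raises IndexError in Python here; excluded by Pre_addMinimum1
    | c0 :: rest =>
      let res0 : Int := if c0 = 'b' then 1 else if c0 = 'c' then 2 else 0
      finishA (rest.foldl stepA ([c0], res0))

-- ===== PORT B =====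
-- Source B helpers: c in 'abc', the two boundary-fee dict lookups
def isABC (c : Char) : Bool := c == 'a' || c == 'b' || c == 'c'
def headFee (c : Char) : Int := if c = 'b' then 1 else if c = 'c' then 2 else 0
def tailFee (c : Char) : Int := if c = 'a' then 2 else if c = 'b' then 1 else 0

-- Source B's loop body; state = (current run: none or (first, prev, groups, length), total)
def stepB (st : Option (Char × Char × Int × Int) × Int) (c : Char) :
    Option (Char × Char × Int × Int) × Int :=
  match st with
  | (none, t) => if isABC c then (some (c, c, 1, 1), t) else (none, t)
  | (some (f, p, g, len), t) =>
    if isABC c then (some (f, c, g + (if c ≤ p then 1 else 0), len + 1), t)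
    else (none, t + (3 * g - len - ((f.toNat : Int) - 97) - (2 - ((p.toNat : Int) - 97))))

def addMinimum1_alt (word : String) : Int :=
  let cs := word.toList
  match cs with
  | [] => 0  -- word[0] raises IndexError in Python here too; excluded by Pre_addMinimum1
  | c0 :: rest =>
    let total0 := headFee c0 + tailFee (rest.getLastD c0)   -- word[0], word[-1] fees
    ((cs ++ ['.']).foldl stepB (none, total0)).2            -- for c in word + '.'

-- ===== PRECONDITION & SPEC =====
-- Pre_ excludes only the empty string, on which both Pythons raise IndexError at word[0].
def Pre_addMinimum1 (word : String) : Prop := word.toList ≠ []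
instance (word : String) : Decidable (Pre_addMinimum1 word) := by
  unfold Pre_addMinimum1; infer_instance
def pvWitness_addMinimum1 : String := "acbcab"

-- On non-empty words of one repeated character outside the pattern alphabet a/b/c, A's
-- len(set(word))==1 shortcut returns 2*len(word) while its own general path and B return 0;
-- since A charges nothing for non-pattern letters everywhere else, B's 0 is the consistent
-- value on this unspecified corner.
def D_addMinimum1 (word : String) : Prop :=
  word.toList ≠ [] ∧ word.toList.headD 'a' ∉ (['a', 'b', 'c'] : List Char) ∧
    word.toList.all (fun x => x == word.toList.headD 'a') = true
instance (word : String) : Decidable (D_addMinimum1 word) := by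
  unfold D_addMinimum1; infer_instance

def Spec_addMinimum1 (word : String) (out : Int) : Prop :=
  ¬ D_addMinimum1 word → out = addMinimum1_alt word
instance (word : String) (out : Int) : Decidable (Spec_addMinimum1 word out) := by
  unfold Spec_addMinimum1; infer_instance

def pvDiffWitness_addMinimum1 : String := "dd"
def pvDiffWitnessOut_addMinimum1 : Int × Int := (4, 0)

-- ===== CLAIM (what is proved, stated in full; the proofs are below) =====
def Claim_unchanged_addMinimum1 : Prop := ∀ (word : String), Dom_addMinimum1 word → Pre_addMinimum1 word → Spec_addMinimum1 word (addMinimum1 word)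
def Claim_changed_addMinimum1 : Prop := Dom_addMinimum1 (pvDiffWitness_addMinimum1) ∧ Pre_addMinimum1 (pvDiffWitness_addMinimum1) ∧ D_addMinimum1 (pvDiffWitness_addMinimum1) ∧ addMinimum1 (pvDiffWitness_addMinimum1) = pvDiffWitnessOut_addMinimum1.1 ∧ addMinimum1_alt (pvDiffWitness_addMinimum1) = pvDiffWitnessOut_addMinimum1.2 ∧ pvDiffWitnessOut_addMinimum1.1 ≠ pvDiffWitnessOut_addMinimum1.2
def Claim_exact_addMinimum1 : Prop := ∀ (word : String), Dom_addMinimum1 word → Pre_addMinimum1 word → D_addMinimum1 word → addMinimum1 word ≠ addMinimum1_alt word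

-- ===== LEMMAS AND PROOFS =====

-- per-transition insertion cost of A's table, in closed form (proof helper)
def gapB (p c : Char) : Int :=
  if (p = 'a' ∨ p = 'b' ∨ p = 'c') ∧ (c = 'a' ∨ c = 'b' ∨ c = 'c') then
    PySem.Int.mod ((c.toNat : Int) - (p.toNat : Int) - 1) 3
  else 0

-- sum of gapB along a list starting from previous char p
def gaps : Char → List Char → Int
  | _, [] => 0
  | p, c :: cs => gapB p c + gaps c cs

-- sum of gapB over the adjacent pairs of a list (no previous char)
def gapsAll : List Char → Int
  | [] => 0
  | c :: cs => gaps c cs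

-- A's loop body always pushes the current char and adds exactly gapB of the transition
lemma stepA_cost (p c : Char) (stk : List Char) (res : Int) :
    stepA (p :: stk, res) c = (c :: p :: stk, res + gapB p c) := by
  by_cases hpa : p = 'a' <;> by_cases hpb : p = 'b' <;> by_cases hpc : p = 'c' <;>
    by_cases hca : c = 'a' <;> by_cases hcb : c = 'b' <;> by_cases hcc : c = 'c' <;>
    simp_all [stepA, gapB, PySem.Int.mod]

-- invariant of A's for-loop: final result = accumulated res + remaining gaps + last-char fee
lemma foldA_inv (rest : List Char) : ∀ (p : Char) (stk : List Char) (res : Int),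
    finishA (rest.foldl stepA (p :: stk, res))
      = res + gaps p rest
        + (if rest.getLastD p = 'a' then 2 else if rest.getLastD p = 'b' then 1 else 0) := by
  induction rest with
  | nil =>
    intro p stk res
    simp only [List.foldl_nil, finishA, List.headD_cons, gaps, List.getLastD_nil]
    split_ifs <;> ring
  | cons c cs ih =>
    intro p stk res
    simp only [List.foldl_cons, stepA_cost, gaps, List.getLastD_cons]
    rw [ih c (p :: stk) (res + gapB p c)]
    ring

-- a foreign previous char contributes nothing: gaps from it = gapsAll
lemma gaps_foreign (c : Char) (hc : isABC c = false) (l : List Char) :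
    gaps c l = gapsAll l := by
  cases l with
  | nil => rfl
  | cons d ds =>
    have : gapB c d = 0 := by
      simp only [isABC, Bool.or_eq_false_iff, beq_eq_false_iff_ne, ne_eq] at hc
      simp [gapB, hc.1.1, hc.1.2, hc.2]
    simp [gapsAll, gaps, this]

-- closing a run: the pending closed-form contribution of a run
def segClose (f p : Char) (g len : Int) : Int :=
  3 * g - len - ((f.toNat : Int) - 97) - (2 - ((p.toNat : Int) - 97))

-- extending a run by one pattern letter costs exactly gapB of the transition
lemma segClose_step (f p c : Char) (g len : Int)
    (hp : isABC p = true) (hc : isABC c = true) :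
    segClose f c (g + (if c ≤ p then 1 else 0)) (len + 1) = segClose f p g len + gapB p c := by
  have hp' : p = 'a' ∨ p = 'b' ∨ p = 'c' := by
    simp only [isABC, Bool.or_eq_true, beq_iff_eq] at hp; tauto
  have hc' : c = 'a' ∨ c = 'b' ∨ c = 'c' := by
    simp only [isABC, Bool.or_eq_true, beq_iff_eq] at hc; tauto
  rcases hp' with h | h | h <;> rcases hc' with h' | h' | h' <;> subst h <;> subst h' <;>
    simp [segClose, gapB, PySem.Int.mod] <;> ring

-- a run just opened at c has zero pending contribution
lemma segClose_open (c : Char) (hc : isABC c = true) : segClose c c 1 1 = 0 := by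
  have hc' : c = 'a' ∨ c = 'b' ∨ c = 'c' := by
    simp only [isABC, Bool.or_eq_true, beq_iff_eq] at hc; tauto
  rcases hc' with h | h | h <;> subst h <;> simp [segClose]

-- bridge between B's isABC test and D_'s membership condition
lemma isABC_false_iff (c : Char) : isABC c = false ↔ c ∉ (['a', 'b', 'c'] : List Char) := by
  simp only [isABC, Bool.or_eq_false_iff, beq_eq_false_iff_ne, ne_eq, List.mem_cons,
    List.not_mem_nil, List.mem_singleton]
  tauto

-- a foreign current char has zero table cost
lemma gapB_foreign_right (p c : Char) (hc : isABC c = false) : gapB p c = 0 := by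
  simp only [isABC, Bool.or_eq_false_iff, beq_eq_false_iff_ne, ne_eq] at hc
  simp [gapB, hc.1.1, hc.1.2, hc.2]

-- combined invariant of B's fold over l ++ ['.']: outside a run the total gains gapsAll l,
-- inside a run (f,p,g,len) it gains the pending segClose plus gaps p l
lemma foldB_inv (l : List Char) :
    (∀ t : Int, ((l ++ ['.']).foldl stepB (none, t)).2 = t + gapsAll l) ∧
    (∀ (f p : Char) (g len t : Int), isABC p = true →
      ((l ++ ['.']).foldl stepB (some (f, p, g, len), t)).2
        = t + segClose f p g len + gaps p l) := by
  induction l with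
  | nil =>
    constructor
    · intro t; simp [stepB, gapsAll, isABC]
    · intro f p g len t _
      simp only [List.nil_append, List.foldl_cons, stepB, List.foldl_nil]
      have h : isABC '.' = false := by decide
      rw [h]
      simp [gaps, segClose]
  | cons c cs ih =>
    constructor
    · intro t
      simp only [List.cons_append, List.foldl_cons, stepB]
      by_cases hc : isABC c = true
      · rw [if_pos hc, ih.2 c c 1 1 t hc, segClose_open c hc]
        simp [gapsAll]
      · have hc' : isABC c = false := by revert hc; cases isABC c <;> simp
        rw [if_neg hc, ih.1 t]
        simp [gapsAll, gaps_foreign c hc' cs]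
    · intro f p g len t hp
      simp only [List.cons_append, List.foldl_cons, stepB]
      by_cases hc : isABC c = true
      · rw [if_pos hc, ih.2 f c _ _ t hc, segClose_step f p c g len hp hc]
        simp only [gaps]
        ring
      · have hc' : isABC c = false := by revert hc; cases isABC c <;> simp
        rw [if_neg hc, ih.1 _]
        simp only [gaps, gaps_foreign c hc' cs, gapB_foreign_right p c hc', segClose]
        ring

-- B in closed form: first/last fees plus the table cost of every adjacent pair
lemma altB_eq (word : String) (c0 : Char) (rest : List Char) (h : word.toList = c0 :: rest) :
    addMinimum1_alt word
      = headFee c0 + tailFee (rest.getLastD c0) + gaps c0 rest := by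
  unfold addMinimum1_alt
  rw [h]
  show (((c0 :: rest) ++ ['.']).foldl stepB
      (none, headFee c0 + tailFee (rest.getLastD c0))).2 = _
  rw [(foldB_inv (c0 :: rest)).1]
  show _ + gaps c0 rest = _
  ring

-- set(word) of length 1 means all characters equal the first
lemma all_eq_of_set_len_one (c0 : Char) (rest : List Char)
    (h : (PySem.Set.ofList (c0 :: rest)).length = 1) : ∀ x ∈ rest, x = c0 := by
  obtain ⟨y, hy⟩ := List.length_eq_one_iff.mp h
  have hc0 : c0 ∈ PySem.Set.ofList (c0 :: rest) := by
    rw [PySem.Set.mem_ofList]; simp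
  rw [hy] at hc0
  have hyc0 : y = c0 := (List.mem_singleton.mp hc0).symm
  intro x hx
  have hm : x ∈ PySem.Set.ofList (c0 :: rest) := by
    rw [PySem.Set.mem_ofList]; simp [hx]
  rw [hy, hyc0] at hm
  simpa using hm

-- conversely, an all-equal nonempty list has a singleton set
lemma set_len_one_of_all_eq (c0 : Char) (rest : List Char)
    (h : ∀ x ∈ rest, x = c0) : PySem.Set.ofList (c0 :: rest) = [c0] := by
  induction rest with
  | nil => rfl
  | cons d ds ih =>
    have hd : d = c0 := h d (by simp)
    subst hd
    have : PySem.Set.ofList (d :: d :: ds) = PySem.Set.ofList (d :: ds) := by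
      simp [PySem.Set.ofList_eq_foldl, List.foldl, PySem.Set.add]
    rw [this]
    exact ih (fun x hx => h x (by simp [hx]))

-- gaps over an all-equal tail
lemma gaps_all_eq (rest : List Char) : ∀ c0 : Char, (∀ x ∈ rest, x = c0) →
    gaps c0 rest = rest.length * gapB c0 c0 := by
  induction rest with
  | nil => intro c0 _; simp [gaps]
  | cons d ds ih =>
    intro c0 h
    have hd : d = c0 := h d (by simp)
    subst hd
    rw [gaps, ih d (fun x hx => h x (by simp [hx]))]
    simp only [List.length_cons]
    push_cast
    ring

-- getLastD of an all-equal tail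
lemma getLastD_all_eq (rest : List Char) : ∀ c0 : Char, (∀ x ∈ rest, x = c0) →
    rest.getLastD c0 = c0 := by
  induction rest with
  | nil => intro c0 _; rfl
  | cons d ds ih =>
    intro c0 h
    have hd : d = c0 := h d (by simp)
    subst hd
    rw [List.getLastD_cons]
    exact ih d (fun x hx => h x (by simp [hx]))

-- ===== VERDICT (by name: the statement is the Claim_ definition above) =====
theorem addMinimum1_spec : Claim_unchanged_addMinimum1 := by
  intro word _ hpre hnd
  unfold Pre_addMinimum1 at hpre
  unfold addMinimum1
  cases h : word.toList with
  | nil => exact absurd h hpre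
  | cons c0 rest =>
    show (if (PySem.Set.ofList (c0 :: rest)).length = 1 then ((c0 :: rest).length : Int) * 2
        else finishA (rest.foldl stepA ([c0],
          if c0 = 'b' then 1 else if c0 = 'c' then 2 else 0))) = _
    rw [altB_eq word c0 rest h]
    by_cases hset : (PySem.Set.ofList (c0 :: rest)).length = 1
    · rw [if_pos hset]
      have hall := all_eq_of_set_len_one c0 rest hset
      have hc0 : isABC c0 = true := by
        by_contra hc
        have hc' : isABC c0 = false := by revert hc; cases isABC c0 <;> simp
        apply hnd
        unfold D_addMinimum1
        refine ⟨by rw [h]; simp,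
          by rw [h]; simp only [List.headD_cons]; exact (isABC_false_iff c0).mp hc', ?_⟩
        rw [h]
        simp only [List.headD_cons, List.all_eq_true]
        intro x hx
        rcases List.mem_cons.mp hx with h1 | h1
        · simp [h1]
        · simp [hall x h1]
      rw [gaps_all_eq rest c0 hall, getLastD_all_eq rest c0 hall]
      have hc0' : c0 = 'a' ∨ c0 = 'b' ∨ c0 = 'c' := by
        simp only [isABC, Bool.or_eq_true, beq_iff_eq] at hc0; tauto
      rcases hc0' with h1 | h1 | h1 <;> subst h1 <;>
        simp [headFee, tailFee, gapB, PySem.Int.mod, List.length_cons] <;> ring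
    · rw [if_neg hset]
      rw [foldA_inv rest c0 []]
      unfold headFee tailFee
      ring

theorem addMinimum1_changed : Claim_changed_addMinimum1 := by
  unfold Claim_changed_addMinimum1; decide

theorem addMinimum1_tight : Claim_exact_addMinimum1 := by
  intro word _ hpre hd
  obtain ⟨hne, hfor, hall⟩ := hd
  cases h : word.toList with
  | nil => exact absurd h hne
  | cons c0 rest =>
    rw [h] at hfor hall
    simp only [List.headD_cons, List.all_eq_true] at hfor hall
    have hforB : isABC c0 = false := (isABC_false_iff c0).mpr hfor
    have hall' : ∀ x ∈ rest, x = c0 := by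
      intro x hx
      have := hall x (by simp [hx])
      exact beq_iff_eq.mp this
    unfold addMinimum1
    rw [h]
    show (if (PySem.Set.ofList (c0 :: rest)).length = 1 then ((c0 :: rest).length : Int) * 2
        else finishA (rest.foldl stepA ([c0],
          if c0 = 'b' then 1 else if c0 = 'c' then 2 else 0))) ≠ _
    rw [altB_eq word c0 rest h]
    rw [set_len_one_of_all_eq c0 rest hall']
    simp only [List.length_singleton, if_pos]
    rw [gaps_all_eq rest c0 hall', getLastD_all_eq rest c0 hall']
    have hc' : isABC c0 = false := hforB
    simp only [isABC, Bool.or_eq_false_iff, beq_eq_false_iff_ne, ne_eq] at hc'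
    rw [gapB_foreign_right c0 c0 (by simp [isABC, hc'.1.1, hc'.1.2, hc'.2])]
    simp only [headFee, tailFee, if_neg hc'.1.2, if_neg hc'.2, if_neg hc'.1.1]
    simp only [List.length_cons]
    push_cast
    intro hcontra
    omega
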